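-- pv_equiv track=rewrite | github.com/SuLab/DBR-X | src/important_paths/utils.py | create_node_mappings
-- ===== SOURCE A (Python) =====
-- from collections import defaultdict
-- from collections import defaultdict
--
-- def create_node_mappings(node_labels):
--     """
--     Create node mappings by label with optimized data structures.
--
--     Args:
--         node_labels (dict): Dictionary mapping node IDs to labels.
--
--     Returns:
--         tuple: Set of nodes by label and node ID mappings.
--     """
--     set_nodes_label = defaultdict(list)
--     for node, label in node_labels.items():
--         set_nodes_label[label].append(node)
--
--     set_nodes_label_id = {}
--     set_nodes_label_id_rev = {}
--
--     for label, nodes in set_nodes_label.items():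
--         dict_label = {node: i for i, node in enumerate(nodes)}
--         dict_label_rev = {i: node for i, node in enumerate(nodes)}
--         set_nodes_label_id[label] = [dict_label]
--         set_nodes_label_id_rev[label] = [dict_label_rev]
--
--     return set_nodes_label, set_nodes_label_id, set_nodes_label_id_rev
-- ===== SOURCE B (Python) =====
-- from collections import defaultdict
--
-- def create_node_mappings(node_labels):
--     """Single pass: groups and both index maps are maintained together."""
--     set_nodes_label = defaultdict(list)
--     ids = {}
--     revs = {}
--     for node, label in node_labels.items():
--         nodes = set_nodes_label[label]
--         i = len(nodes)
--         nodes.append(node)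
--         ids.setdefault(label, {})[node] = i
--         revs.setdefault(label, {})[i] = node
--     return (set_nodes_label,
--             {label: [d] for label, d in ids.items()},
--             {label: [d] for label, d in revs.items()})
-- ===== Notes on version B (the rewrite author's own statement) =====
-- stated objective: alternative
-- what changed: A groups nodes in one pass and then runs a second pass over the groups to build the forward and reverse index dicts; B is a single fused pass that appends each node to its label's group and records node->index and index->node in the same loop iteration.
import Mathlib
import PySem

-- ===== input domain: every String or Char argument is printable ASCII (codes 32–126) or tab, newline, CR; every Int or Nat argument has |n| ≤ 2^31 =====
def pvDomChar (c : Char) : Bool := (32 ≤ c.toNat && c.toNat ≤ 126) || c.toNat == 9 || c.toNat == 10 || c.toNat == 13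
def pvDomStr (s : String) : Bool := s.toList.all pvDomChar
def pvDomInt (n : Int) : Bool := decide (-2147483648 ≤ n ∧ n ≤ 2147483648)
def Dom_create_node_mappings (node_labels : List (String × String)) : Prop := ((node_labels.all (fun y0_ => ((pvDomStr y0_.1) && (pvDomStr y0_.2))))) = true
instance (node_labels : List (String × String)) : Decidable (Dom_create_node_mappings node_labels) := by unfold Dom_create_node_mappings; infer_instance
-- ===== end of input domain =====

-- B fuses A's two sequential passes into a single loop that maintains the groups and both index maps together (alternative decomposition, same cost).

-- ===== PORT A =====
-- node_labels is a Python dict received as an association list; `.items()` is (Dict.ofList node_labels).items.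
-- The dict comprehensions {node: i …} / {i: node …} range over the distinct nodes of one group, so they port as the literal pair lists.
def create_node_mappings (node_labels : List (String × String)) : (List (String × List String)) × (List (String × List (List (String × Int)))) × (List (String × List (List (Int × String)))) :=
  let items := (PySem.Dict.ofList node_labels).items
  let set_nodes_label : PySem.Dict String (List String) :=
    items.foldl (fun d p => d.modify p.2 [] (fun ns => ns ++ [p.1])) PySem.Dict.empty
  let set_nodes_label_id : PySem.Dict String (List (List (String × Int))) :=
    set_nodes_label.items.foldl
      (fun d p => d.insert p.1 [(PySem.List.enumerate p.2 0).map (fun q => (q.2, q.1))])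
      PySem.Dict.empty
  let set_nodes_label_id_rev : PySem.Dict String (List (List (Int × String))) :=
    set_nodes_label.items.foldl
      (fun d p => d.insert p.1 [PySem.List.enumerate p.2 0])
      PySem.Dict.empty
  (set_nodes_label.items, set_nodes_label_id.items, set_nodes_label_id_rev.items)

-- ===== PORT B =====
-- B's single-pass loop body: append the node to its label's group and record node→i and i→node at once
def pvStepB (st : (PySem.Dict String (List String)) × (PySem.Dict String (PySem.Dict String Int)) × (PySem.Dict String (PySem.Dict Int String))) (p : String × String) : (PySem.Dict String (List String)) × (PySem.Dict String (PySem.Dict String Int)) × (PySem.Dict String (PySem.Dict Int String)) :=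
  let nodes := st.1.getD p.2 []
  let i : Int := nodes.length
  (st.1.insert p.2 (nodes ++ [p.1]),
   st.2.1.modify p.2 PySem.Dict.empty (fun d => d.insert p.1 i),
   st.2.2.modify p.2 PySem.Dict.empty (fun d => d.insert i p.1))

def create_node_mappings_alt (node_labels : List (String × String)) : (List (String × List String)) × (List (String × List (List (String × Int)))) × (List (String × List (List (Int × String)))) :=
  let st := (PySem.Dict.ofList node_labels).items.foldl pvStepB
    (PySem.Dict.empty, PySem.Dict.empty, PySem.Dict.empty)
  (st.1.items,
   st.2.1.items.map (fun q => (q.1, [q.2.items])),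
   st.2.2.items.map (fun q => (q.1, [q.2.items])))

-- ===== PRECONDITION & SPEC =====
def Spec_create_node_mappings (node_labels : List (String × String)) (out : (List (String × List String)) × (List (String × List (List (String × Int)))) × (List (String × List (List (Int × String))))) : Prop := out = create_node_mappings_alt node_labels
instance (node_labels : List (String × String)) (out : (List (String × List String)) × (List (String × List (List (String × Int)))) × (List (String × List (List (Int × String))))) : Decidable (Spec_create_node_mappings node_labels out) := by
  unfold Spec_create_node_mappings
  exact @instDecidableEqProd _ _ instDecidableEqList
    (@instDecidableEqProd _ _ instDecidableEqList instDecidableEqList) out (create_node_mappings_alt node_labels)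

-- ===== CLAIM (what is proved, stated in full; the proofs are below) =====
def Claim_equal_create_node_mappings : Prop := ∀ (node_labels : List (String × String)), Dom_create_node_mappings node_labels → Spec_create_node_mappings node_labels (create_node_mappings node_labels)

-- ===== LEMMAS AND PROOFS =====

-- A's grouping pass as a function of the processed prefix
def pvGrp (xs : List (String × String)) : PySem.Dict String (List String) :=
  xs.foldl (fun d p => d.modify p.2 [] (fun ns => ns ++ [p.1])) PySem.Dict.empty

-- the per-label index dicts A derives from a finished group, which B maintains incrementally
def pvIds (ns : List String) : PySem.Dict String Int :=
  ⟨(PySem.List.enumerate ns 0).map (fun q => (q.2, q.1))⟩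
def pvRevs (ns : List String) : PySem.Dict Int String :=
  ⟨PySem.List.enumerate ns 0⟩

def pvMkIds (xs : List (String × String)) : PySem.Dict String (PySem.Dict String Int) :=
  ⟨(pvGrp xs).items.map (fun p => (p.1, pvIds p.2))⟩
def pvMkRevs (xs : List (String × String)) : PySem.Dict String (PySem.Dict Int String) :=
  ⟨(pvGrp xs).items.map (fun p => (p.1, pvRevs p.2))⟩

theorem pvGrp_getD (xs : List (String × String)) (c : String) :
    (pvGrp xs).getD c [] = (xs.filter (fun p => p.2 == c)).map (fun p => p.1) := by
  have h : pvGrp xs = (xs.map (fun p => (p.2, p.1))).foldl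
      (fun d p => d.modify p.1 [] (fun ns => ns ++ [p.2])) PySem.Dict.empty := by
    rw [List.foldl_map]; rfl
  rw [h, PySem.Dict.getD_foldl_modify_append]
  simp [List.filter_map, List.map_map, Function.comp_def]

theorem pvGrp_keys_nodup (xs : List (String × String)) : (pvGrp xs).keys.Nodup := by
  exact PySem.Dict.nodup_keys_foldl_modify_key xs (fun p => p.2) []
    (fun _ p ns => ns ++ [p.1]) PySem.Dict.empty (by simp [PySem.Dict.keys, PySem.Dict.empty])

theorem pvIds_snoc (ns : List String) (x : String) (hx : x ∉ ns) :
    (pvIds ns).insert x (ns.length : Int) = pvIds (ns ++ [x]) := by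
  have hc : (pvIds ns).contains x = false := by
    have hk : (pvIds ns).keys = ns := by
      simp [pvIds, PySem.Dict.keys, List.map_map, Function.comp_def]
    rw [← Bool.not_eq_true, PySem.Dict.contains_iff_mem_keys, hk]
    exact hx
  apply PySem.Dict.ext
  rw [PySem.Dict.items_insert_of_not_contains _ _ hc]
  simp [pvIds, PySem.List.enumerate_append]

theorem pvRevs_snoc (ns : List String) (x : String) :
    (pvRevs ns).insert (ns.length : Int) x = pvRevs (ns ++ [x]) := by
  have hc : (pvRevs ns).contains (ns.length : Int) = false := by
    rw [← Bool.not_eq_true, PySem.Dict.contains_iff_mem_keys]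
    intro hmem
    simp only [pvRevs, PySem.Dict.keys, List.mem_map] at hmem
    obtain ⟨q, hq, hfst⟩ := hmem
    rw [PySem.List.mem_enumerate_iff] at hq
    obtain ⟨k, hk, rfl⟩ := hq
    simp at hfst
    omega
  apply PySem.Dict.ext
  rw [PySem.Dict.items_insert_of_not_contains _ _ hc]
  simp [pvRevs, PySem.List.enumerate_append]

theorem pvStepB_def (g : PySem.Dict String (List String))
    (ids : PySem.Dict String (PySem.Dict String Int)) (revs : PySem.Dict String (PySem.Dict Int String))
    (p : String × String) :
    pvStepB (g, ids, revs) p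
      = (g.insert p.2 (g.getD p.2 [] ++ [p.1]),
         ids.modify p.2 PySem.Dict.empty (fun d => d.insert p.1 ((g.getD p.2 []).length : Int)),
         revs.modify p.2 PySem.Dict.empty (fun d => d.insert ((g.getD p.2 []).length : Int) p.1)) := rfl

-- one step of B's loop, on a node key unseen so far, advances all three components of the invariant
theorem pvStep_eq (pre : List (String × String)) (p : String × String)
    (hfresh : p.1 ∉ pre.map Prod.fst) :
    pvStepB (pvGrp pre, pvMkIds pre, pvMkRevs pre) p
      = (pvGrp (pre ++ [p]), pvMkIds (pre ++ [p]), pvMkRevs (pre ++ [p])) := by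
  have hgrp : pvGrp (pre ++ [p]) = (pvGrp pre).insert p.2 ((pvGrp pre).getD p.2 [] ++ [p.1]) := by
    simp [pvGrp, List.foldl_append, PySem.Dict.modify]
  have hxns : p.1 ∉ (pvGrp pre).getD p.2 [] := by
    rw [pvGrp_getD]
    intro hmem
    simp only [List.mem_map, List.mem_filter] at hmem
    obtain ⟨q, ⟨hq, _⟩, hq1⟩ := hmem
    exact hfresh (List.mem_map.mpr ⟨q, hq, hq1⟩)
  have hkeq : (pvMkIds pre).contains p.2 = (pvGrp pre).contains p.2 := by
    simp [pvMkIds, PySem.Dict.contains, List.any_map, Function.comp_def]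
  have hkeq' : (pvMkRevs pre).contains p.2 = (pvGrp pre).contains p.2 := by
    simp [pvMkRevs, PySem.Dict.contains, List.any_map, Function.comp_def]
  rw [pvStepB_def]
  by_cases hc : (pvGrp pre).contains p.2 = true
  · -- existing label: the inner dicts gain one fresh entry each
    obtain ⟨ns, hns⟩ : ∃ v, (p.2, v) ∈ (pvGrp pre).items := by
      rw [PySem.Dict.contains_iff_mem_keys] at hc
      simp only [PySem.Dict.keys, List.mem_map] at hc
      obtain ⟨q, hq, hq1⟩ := hc
      exact ⟨q.2, by rwa [show (p.2, q.2) = q from by rw [← hq1]]⟩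
    have hgd : (pvGrp pre).getD p.2 [] = ns :=
      PySem.Dict.getD_of_mem_items _ hns (pvGrp_keys_nodup pre) []
    have hmkids_nodup : (pvMkIds pre).keys.Nodup := by
      have : (pvMkIds pre).keys = (pvGrp pre).keys := by
        simp [pvMkIds, PySem.Dict.keys, List.map_map, Function.comp_def]
      rw [this]; exact pvGrp_keys_nodup pre
    have hmkrevs_nodup : (pvMkRevs pre).keys.Nodup := by
      have : (pvMkRevs pre).keys = (pvGrp pre).keys := by
        simp [pvMkRevs, PySem.Dict.keys, List.map_map, Function.comp_def]
      rw [this]; exact pvGrp_keys_nodup pre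
    have hgdid : (pvMkIds pre).getD p.2 PySem.Dict.empty = pvIds ns := by
      apply PySem.Dict.getD_of_mem_items _ _ hmkids_nodup
      exact List.mem_map.mpr ⟨(p.2, ns), hns, rfl⟩
    have hgdrev : (pvMkRevs pre).getD p.2 PySem.Dict.empty = pvRevs ns := by
      apply PySem.Dict.getD_of_mem_items _ _ hmkrevs_nodup
      exact List.mem_map.mpr ⟨(p.2, ns), hns, rfl⟩
    simp only [Prod.mk.injEq]
    refine ⟨by simp [hgrp], ?_, ?_⟩
    · apply PySem.Dict.ext
      rw [PySem.Dict.modify, hgdid]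
      rw [PySem.Dict.items_insert_of_contains _ _ (by rw [hkeq]; exact hc)]
      show _ = (pvGrp (pre ++ [p])).items.map _
      rw [hgrp, PySem.Dict.items_insert_of_contains _ _ hc]
      simp only [pvMkIds, List.map_map]
      apply List.map_congr_left
      intro q hq
      by_cases hq2 : q.1 = p.2
      · simp [hq2, hgd, pvIds_snoc ns p.1 (hgd ▸ hxns)]
      · simp [hq2]
    · apply PySem.Dict.ext
      rw [PySem.Dict.modify, hgdrev]
      rw [PySem.Dict.items_insert_of_contains _ _ (by rw [hkeq']; exact hc)]
      show _ = (pvGrp (pre ++ [p])).items.map _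
      rw [hgrp, PySem.Dict.items_insert_of_contains _ _ hc]
      simp only [pvMkRevs, List.map_map]
      apply List.map_congr_left
      intro q hq
      by_cases hq2 : q.1 = p.2
      · simp [hq2, hgd, pvRevs_snoc ns p.1]
      · simp [hq2]
  · -- new label: all three dicts append a fresh singleton entry
    rw [Bool.not_eq_true] at hc
    have hgd : (pvGrp pre).getD p.2 [] = [] := PySem.Dict.getD_of_not_contains _ _ hc
    simp only [Prod.mk.injEq]
    refine ⟨by simp [hgrp], ?_, ?_⟩
    · apply PySem.Dict.ext
      rw [PySem.Dict.modify, PySem.Dict.getD_of_not_contains _ _ (by rw [hkeq]; exact hc)]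
      rw [PySem.Dict.items_insert_of_not_contains _ _ (by rw [hkeq]; exact hc)]
      show _ = (pvGrp (pre ++ [p])).items.map _
      rw [hgrp, PySem.Dict.items_insert_of_not_contains _ _ hc, hgd]
      simp [pvMkIds, pvIds, PySem.Dict.insert, PySem.Dict.empty, PySem.Dict.contains]
    · apply PySem.Dict.ext
      rw [PySem.Dict.modify, PySem.Dict.getD_of_not_contains _ _ (by rw [hkeq']; exact hc)]
      rw [PySem.Dict.items_insert_of_not_contains _ _ (by rw [hkeq']; exact hc)]
      show _ = (pvGrp (pre ++ [p])).items.map _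
      rw [hgrp, PySem.Dict.items_insert_of_not_contains _ _ hc, hgd]
      simp [pvMkRevs, pvRevs, PySem.Dict.insert, PySem.Dict.empty, PySem.Dict.contains]

-- B's fold carries A's groups together with both derived index maps (keys of the iterated dict are unique)
theorem pvInv (pre l : List (String × String))
    (hnd : ((pre ++ l).map Prod.fst).Nodup) :
    l.foldl pvStepB (pvGrp pre, pvMkIds pre, pvMkRevs pre)
      = (pvGrp (pre ++ l), pvMkIds (pre ++ l), pvMkRevs (pre ++ l)) := by
  induction l generalizing pre with
  | nil => simp
  | cons p l ih =>
    have hfresh : p.1 ∉ pre.map Prod.fst := by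
      rw [List.map_append, List.nodup_append] at hnd
      intro hmem
      exact hnd.2.2 p.1 hmem p.1 (by simp) rfl
    rw [List.foldl_cons, pvStep_eq pre p hfresh, ih (pre ++ [p]) (by simpa using hnd)]
    simp

-- ===== VERDICT (by name: the statement is the Claim_ definition above) =====
theorem create_node_mappings_spec : Claim_equal_create_node_mappings := by
  intro nl _
  unfold Spec_create_node_mappings create_node_mappings create_node_mappings_alt
  have hnd : (((PySem.Dict.ofList nl).items).map Prod.fst).Nodup := PySem.Dict.nodup_keys_ofList nl
  have hfold := pvInv [] (PySem.Dict.ofList nl).items (by simpa using hnd)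
  simp only [List.nil_append] at hfold
  have h0 : (pvGrp [], pvMkIds [], pvMkRevs [])
      = ((PySem.Dict.empty : PySem.Dict String (List String)),
         (PySem.Dict.empty : PySem.Dict String (PySem.Dict String Int)),
         (PySem.Dict.empty : PySem.Dict String (PySem.Dict Int String))) := rfl
  rw [← h0, hfold]
  set xs := (PySem.Dict.ofList nl).items with hxs
  refine Prod.ext rfl (Prod.ext ?_ ?_)
  · show ((pvGrp xs).items.foldl (fun d p => d.insert p.1 [(PySem.List.enumerate p.2 0).map (fun q => (q.2, q.1))]) PySem.Dict.empty).items
      = (pvMkIds xs).items.map (fun q => (q.1, [q.2.items]))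
    rw [PySem.Dict.items_foldl_insert_fresh _ _ _ _ (fun a _ => PySem.Dict.contains_empty a.1)
      (pvGrp_keys_nodup xs)]
    simp [pvMkIds, pvIds, List.map_map, Function.comp_def, PySem.Dict.empty]
  · show ((pvGrp xs).items.foldl (fun d p => d.insert p.1 [PySem.List.enumerate p.2 0]) PySem.Dict.empty).items
      = (pvMkRevs xs).items.map (fun q => (q.1, [q.2.items]))
    rw [PySem.Dict.items_foldl_insert_fresh _ _ _ _ (fun a _ => PySem.Dict.contains_empty a.1)
      (pvGrp_keys_nodup xs)]
    simp [pvMkRevs, pvRevs, List.map_map, Function.comp_def, PySem.Dict.empty]
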